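-- pv_equiv track=rewrite | github.com/myk-org/docsfy | src/docsfy/generator.py | _strip_ai_preamble
-- ===== SOURCE A (Python) =====
-- def _strip_ai_preamble(text: str) -> str:
--     """Strip AI thinking/planning text that appears before actual content."""
--     lines = text.split("\n")
--     for i, line in enumerate(lines):
--         if i > 10:
--             break
--         if line.startswith("#"):
--             return "\n".join(lines[i:])
--     return text
-- ===== SOURCE B (Python) =====
-- def _strip_ai_preamble(text: str) -> str:
--     """Strip AI thinking/planning text that appears before actual content."""
--     if text.startswith("#"):
--         return text
--     j = text.find("\n#")
--     if j == -1:
--         return text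
--     if text[:j + 1].count("\n") <= 10:
--         return text[j + 1:]
--     return text
-- ===== Notes on version B (the rewrite author's own statement) =====
-- stated objective: alternative
-- what changed: B does no per-line loop at all: it searches once for the two-character substring newline-then-hash, counts the newlines in the prefix up to the hit to check the 11-line bound, and slices the suffix; A splits the text into a line list and iterates it with an index check.
import Mathlib
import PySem

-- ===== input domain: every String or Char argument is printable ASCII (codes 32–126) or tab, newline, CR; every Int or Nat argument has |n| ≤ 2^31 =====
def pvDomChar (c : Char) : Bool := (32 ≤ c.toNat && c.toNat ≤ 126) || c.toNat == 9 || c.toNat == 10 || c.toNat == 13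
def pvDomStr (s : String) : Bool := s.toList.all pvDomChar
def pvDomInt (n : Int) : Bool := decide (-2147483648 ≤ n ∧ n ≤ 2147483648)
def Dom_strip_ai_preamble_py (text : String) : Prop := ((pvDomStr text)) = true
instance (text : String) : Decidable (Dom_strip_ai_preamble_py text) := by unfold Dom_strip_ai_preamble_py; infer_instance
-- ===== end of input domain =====

-- B replaces A's split-into-lines-and-iterate with a single substring search for "\n#"
-- plus one newline count for the 11-line bound; same return value.

-- ===== PORT A =====
-- A's for-loop over enumerate(lines): each step checks 'i > 10' then 'line.startswith("#")'.
def stripA_go (lines : List (List Char)) (text : List Char) :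
    List (Int × List Char) → List Char
  | [] => text
  | (i, line) :: rest =>
    if i > 10 then text
    else if PySem.Chars.startswith line ['#'] then
      PySem.Chars.join ['\n'] (PySem.List.slice lines (some i) none)
    else stripA_go lines text rest

def strip_ai_preamble_py (text : String) : String :=
  let cs := text.toList
  let lines := PySem.Chars.splitOn cs ['\n']
  String.ofList (stripA_go lines cs (PySem.List.enumerate lines 0))

-- ===== PORT B =====
-- Source B: startswith('#'); j = text.find('\n#'); if j == -1 return text;
-- return text[j+1:] if text[:j+1].count('\n') <= 10 else text.
def strip_ai_preamble_py_alt (text : String) : String :=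
  let cs := text.toList
  if PySem.Chars.startswith cs ['#'] then text
  else
    let j := PySem.Chars.find cs ['\n', '#']
    if j = -1 then text
    else if PySem.Chars.count (PySem.List.slice cs none (some (j + 1))) ['\n'] ≤ 10 then
      String.ofList (PySem.List.slice cs (some (j + 1)) none)
    else text

-- ===== PRECONDITION & SPEC =====
def Spec_strip_ai_preamble_py (text : String) (out : String) : Prop := out = strip_ai_preamble_py_alt text
instance (text : String) (out : String) : Decidable (Spec_strip_ai_preamble_py text out) := by unfold Spec_strip_ai_preamble_py; infer_instance

-- ===== CLAIM (what is proved, stated in full; the proofs are below) =====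
def Claim_equal_strip_ai_preamble_py : Prop := ∀ (text : String), Dom_strip_ai_preamble_py text → Spec_strip_ai_preamble_py text (strip_ai_preamble_py text)

-- ===== LEMMAS AND PROOFS =====

-- Proof-side intermediate program: A's loop expressed as an offset scan over the text.
def stripB_go (text : List Char) : Nat → Nat → List Char
  | 0, _ => text
  | fuel + 1, start =>
    if PySem.Chars.startswith (text.drop start) ['#'] then
      PySem.List.slice text (some (start : Int)) none
    else
      let nl := PySem.Chars.findFrom text ['\n'] (start : Int) none
      if nl = -1 then text
      else stripB_go text fuel (nl.toNat + 1)

-- Reference splitter: mySplit cur cs prepends the pending chunk cur to the first line of cs.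
def mySplit (cur : List Char) : List Char → List (List Char)
  | [] => [cur]
  | c :: rest => if c = '\n' then cur :: mySplit [] rest else mySplit (cur ++ [c]) rest

theorem splitOn_go_eq (l : List Char) : ∀ (fuel : Nat) (cur : List Char) (acc : List (List Char)),
    l.length < fuel →
    PySem.Chars.splitOn.go ['\n'] fuel l cur acc = acc.reverse ++ mySplit cur.reverse l := by
  induction l with
  | nil =>
    intro fuel cur acc h
    match fuel, h with
    | fuel + 1, _ => simp [PySem.Chars.splitOn.go, mySplit]
  | cons c rest ih =>
    intro fuel cur acc h
    match fuel, h with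
    | fuel + 1, h =>
      by_cases hc : c = '\n'
      · subst hc
        have hstep : PySem.Chars.splitOn.go ['\n'] (fuel + 1) ('\n' :: rest) cur acc =
            PySem.Chars.splitOn.go ['\n'] fuel rest [] (cur.reverse :: acc) := by
          rw [PySem.Chars.splitOn.go]; simp [List.isPrefixOf]
        rw [hstep, ih fuel [] (cur.reverse :: acc) (by simp at h; omega)]
        simp [mySplit]
      · have hstep : PySem.Chars.splitOn.go ['\n'] (fuel + 1) (c :: rest) cur acc =
            PySem.Chars.splitOn.go ['\n'] fuel rest (c :: cur) acc := by
          rw [PySem.Chars.splitOn.go]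
          simp only [List.isPrefixOf, Bool.and_true]
          rw [if_neg (by simp [Ne.symm hc])]
        rw [hstep, ih fuel (c :: cur) acc (by simp at h ⊢; omega)]
        simp [mySplit, hc]

theorem splitOn_eq_mySplit (cs : List Char) :
    PySem.Chars.splitOn cs ['\n'] = mySplit [] cs := by
  rw [PySem.Chars.splitOn, splitOn_go_eq cs (cs.length + 1) [] [] (by omega)]
  simp

theorem mySplit_eq (cs : List Char) : ∀ (cur : List Char),
    mySplit cur cs = (cur ++ cs.takeWhile (· ≠ '\n')) ::
      (match cs.dropWhile (· ≠ '\n') with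
       | [] => []
       | _ :: rest => mySplit [] rest) := by
  induction cs with
  | nil => intro cur; simp [mySplit]
  | cons c rest ih =>
    intro cur
    by_cases hc : c = '\n'
    · subst hc; simp [mySplit]
    · simp only [mySplit, if_neg hc, List.takeWhile_cons, List.dropWhile_cons]
      rw [ih (cur ++ [c])]
      simp [hc]

theorem join_mySplit (cs : List Char) : ∀ cur,
    PySem.Chars.join ['\n'] (mySplit cur cs) = cur ++ cs := by
  induction cs with
  | nil => intro cur; simp [mySplit, PySem.Chars.join_singleton]
  | cons c rest ih =>
    intro cur
    by_cases hc : c = '\n'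
    · subst hc
      obtain ⟨h, t, he⟩ : ∃ h t, mySplit [] rest = h :: t := by
        rw [mySplit_eq]; exact ⟨_, _, rfl⟩
      have hrest := ih []
      rw [he] at hrest
      simp only [mySplit, he, if_true]
      rw [PySem.Chars.join_cons_cons, hrest]
      simp
    · simp only [mySplit, if_neg hc]
      rw [ih (cur ++ [c])]
      simp

theorem find_go_newline (l : List Char) : ∀ (k : Nat),
    PySem.Chars.find.go ['\n'] l k =
      if '\n' ∈ l then ((k + (l.takeWhile (· ≠ '\n')).length : Nat) : Int) else -1 := by
  induction l with
  | nil => intro k; simp [PySem.Chars.find.go]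
  | cons c rest ih =>
    intro k
    rw [PySem.Chars.find.go]
    by_cases hc : c = '\n'
    · subst hc; simp [List.isPrefixOf]
    · have hp : List.isPrefixOf ['\n'] (c :: rest) = false := by
        simp [List.isPrefixOf]; exact fun h' => (hc h'.symm).elim
      rw [hp]
      simp only [Bool.false_eq_true, if_false, ih (k + 1), List.takeWhile_cons, List.mem_cons]
      by_cases hm : '\n' ∈ rest
      · simp [hm, Ne.symm hc, hc]; ring
      · simp [hm, Ne.symm hc]

theorem find_newline (l : List Char) :
    PySem.Chars.find l ['\n'] =
      if '\n' ∈ l then (((l.takeWhile (· ≠ '\n')).length : Nat) : Int) else -1 := by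
  rw [PySem.Chars.find, find_go_newline l 0]; simp

theorem startswith_takeWhile (l : List Char) :
    PySem.Chars.startswith (l.takeWhile (· ≠ '\n')) ['#'] =
      PySem.Chars.startswith l ['#'] := by
  cases l with
  | nil => rfl
  | cons c rest =>
    by_cases hc : c = '\n'
    · subst hc; simp [PySem.Chars.startswith, List.isPrefixOf]
    · simp [hc, PySem.Chars.startswith, List.isPrefixOf]

-- The joint loop invariant: after j consumed lines the offset 'start' points at line j,
-- i.e. the remaining lines are exactly the lines of cs.drop start.
theorem main_loop (cs : List Char) : ∀ (f j start : Nat), f + j = 11 → start ≤ cs.length →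
    List.drop j (mySplit [] cs) = mySplit [] (cs.drop start) →
    stripA_go (mySplit [] cs) cs
        (PySem.List.enumerate (List.drop j (mySplit [] cs)) (j : Int)) =
      stripB_go cs f start := by
  intro f
  induction f with
  | zero =>
    intro j start hj hs hdrop
    have hj11 : j = 11 := by omega
    subst hj11
    rw [stripB_go]
    cases h : List.drop 11 (mySplit [] cs) with
    | nil => simp [PySem.List.enumerate, stripA_go]
    | cons a t =>
      rw [PySem.List.enumerate_cons, stripA_go]
      norm_num
  | succ f ih =>
    intro j start hj hs hdrop
    have hj10 : j ≤ 10 := by omega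
    rw [hdrop, mySplit_eq (cs.drop start) []]
    set t := (cs.drop start).takeWhile (· ≠ '\n') with ht
    rw [PySem.List.enumerate_cons, stripA_go]
    have hnotgt : ¬ ((j : Int) > 10) := by exact_mod_cast by omega
    rw [if_neg hnotgt]
    rw [stripB_go]
    simp only [List.nil_append]
    have hswt : PySem.Chars.startswith t ['#'] = PySem.Chars.startswith (cs.drop start) ['#'] := by
      rw [ht]; exact startswith_takeWhile _
    simp only [hswt]
    by_cases hsw : PySem.Chars.startswith (cs.drop start) ['#'] = true
    · rw [if_pos hsw, if_pos hsw]
      have hsl : PySem.List.slice (mySplit [] cs) (some ((j : Nat) : Int)) none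
          = List.drop j (mySplit [] cs) := PySem.List.slice_from_natCast _ _
      rw [hsl, hdrop, join_mySplit]
      rw [PySem.List.slice_from_natCast]
      simp
    · rw [if_neg hsw, if_neg hsw]
      have hff := PySem.Chars.findFrom_natCast cs ['\n'] start hs
      by_cases hm : '\n' ∈ cs.drop start
      · have hfind : PySem.Chars.find (cs.drop start) ['\n'] = ((t.length : Nat) : Int) := by
          rw [find_newline, if_pos hm, ht]
        have hne : PySem.Chars.find (cs.drop start) ['\n'] ≠ -1 := by rw [hfind]; omega
        rw [hfind] at hff
        have hnl : PySem.Chars.findFrom cs ['\n'] (start : Int) none = ((start + t.length : Nat) : Int) := by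
          rw [hff, if_neg (by omega)]; push_cast; ring
        rw [hnl]
        rw [if_neg (by push_cast; omega)]
        have hdw : ∃ rest, (cs.drop start).dropWhile (· ≠ '\n') = '\n' :: rest := by
          cases hdwe : (cs.drop start).dropWhile (· ≠ '\n') with
          | nil =>
            exfalso
            rw [List.dropWhile_eq_nil_iff] at hdwe
            have := hdwe '\n' hm
            simp at this
          | cons a r =>
            have hne' : (cs.drop start).dropWhile (· ≠ '\n') ≠ [] := by rw [hdwe]; simp
            have hhead := List.head_dropWhile_not (p := fun x => decide (x ≠ '\n')) hne'
            have ha : ((cs.drop start).dropWhile (· ≠ '\n')).head? = some a := by rw [hdwe]; rfl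
            rw [List.head?_eq_some_head hne'] at ha
            rw [Option.some.inj ha] at hhead
            simp at hhead
            exact ⟨r, by rw [hhead]⟩
        obtain ⟨rest, hrest⟩ := hdw
        have hdecomp : cs.drop start = t ++ '\n' :: rest := by
          rw [ht, ← hrest]; exact (List.takeWhile_append_dropWhile).symm
        have hlen : start + t.length + 1 + rest.length = cs.length := by
          have := congrArg List.length hdecomp
          simp [List.length_drop] at this
          omega
        have hstart' : start + t.length + 1 ≤ cs.length := by omega
        have hcsdrop : cs.drop (start + t.length + 1) = rest := by
          have : cs.drop (start + t.length + 1) = (cs.drop start).drop (t.length + 1) := by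
            rw [List.drop_drop]; ring_nf
          rw [this, hdecomp]
          simp
        have htn : (((start + t.length : Nat) : Int)).toNat + 1 = start + t.length + 1 := by
          omega
        rw [htn]
        have hdrop' : List.drop (j + 1) (mySplit [] cs) = mySplit [] rest := by
          rw [← List.tail_drop, hdrop, mySplit_eq (cs.drop start) [], hrest]
          rfl
        have hIH := ih (j + 1) (start + t.length + 1) (by omega) hstart'
          (by rw [hcsdrop]; exact hdrop')
        rw [hdrop'] at hIH
        push_cast at hIH
        rw [hrest]
        exact hIH
      · have hfind : PySem.Chars.find (cs.drop start) ['\n'] = -1 := by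
          rw [find_newline, if_neg hm]
        rw [hfind] at hff
        norm_num at hff
        rw [hff]
        rw [if_pos rfl]
        have hdwnil : (cs.drop start).dropWhile (· ≠ '\n') = [] := by
          rw [List.dropWhile_eq_nil_iff]
          intro x hx
          simp
          rintro rfl
          exact hm hx
        rw [hdwnil]
        rw [PySem.List.enumerate]
        rfl

-- ---- bridge from the offset loop to B's substring search ----

-- first index where "\n#" starts in l
def firstNH : List Char → Option Nat
  | [] => none
  | c :: rest =>
    if List.isPrefixOf ['\n', '#'] (c :: rest) then some 0
    else (firstNH rest).map (· + 1)

theorem firstNH_spec (l : List Char) : ∀ q, firstNH l = some q →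
    ['\n', '#'] <+: l.drop q ∧ ∀ i, i < q → ¬ ['\n', '#'] <+: l.drop i := by
  induction l with
  | nil => intro q h; simp [firstNH] at h
  | cons c rest ih =>
    intro q h
    rw [firstNH] at h
    by_cases hp : List.isPrefixOf ['\n', '#'] (c :: rest)
    · rw [if_pos hp] at h
      obtain rfl : q = 0 := by simpa using h.symm
      refine ⟨List.isPrefixOf_iff_prefix.mp hp, by omega⟩
    · rw [if_neg hp] at h
      obtain ⟨q', hq', rfl⟩ := Option.map_eq_some_iff.mp h
      obtain ⟨h1, h2⟩ := ih q' hq'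
      refine ⟨by simpa using h1, ?_⟩
      intro i hi
      cases i with
      | zero =>
        simp only [List.drop_zero]
        exact fun hpre => hp (List.isPrefixOf_iff_prefix.mpr hpre)
      | succ i => simpa using h2 i (by omega)

theorem firstNH_none (l : List Char) (h : firstNH l = none) :
    ∀ i, ¬ ['\n', '#'] <+: l.drop i := by
  induction l with
  | nil => intro i hp; simpa using hp.length_le
  | cons c rest ih =>
    rw [firstNH] at h
    by_cases hp : List.isPrefixOf ['\n', '#'] (c :: rest)
    · rw [if_pos hp] at h; exact absurd h (by simp)
    · rw [if_neg hp] at h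
      have hr : firstNH rest = none := by simpa using h
      intro i
      cases i with
      | zero =>
        simp only [List.drop_zero]
        exact fun hpre => hp (List.isPrefixOf_iff_prefix.mpr hpre)
      | succ i => simpa using ih hr i

theorem find_eq_firstNH (l : List Char) :
    PySem.Chars.find l ['\n', '#'] =
      (match firstNH l with | none => (-1 : Int) | some q => (q : Int)) := by
  cases hnh : firstNH l with
  | none =>
    simp only
    rw [PySem.Chars.find_eq_neg_one_iff]
    intro hinf
    obtain ⟨j, hj⟩ := (PySem.Chars.exists_prefix_drop_iff_isIn ['\n', '#'] l).mpr
      ((PySem.Chars.isIn_iff_infix ['\n', '#'] l).mpr hinf)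
    exact firstNH_none l hnh j hj
  | some q =>
    obtain ⟨h1, h2⟩ := firstNH_spec l q hnh
    have hinf : ['\n', '#'] <:+: l := by
      rw [← PySem.Chars.isIn_iff_infix, ← PySem.Chars.exists_prefix_drop_iff_isIn]
      exact ⟨q, h1⟩
    have hne : PySem.Chars.find l ['\n', '#'] ≠ -1 :=
      (PySem.Chars.find_ne_neg_one_iff l ['\n', '#']).mpr hinf
    have hz : PySem.Chars.findFrom l ['\n', '#'] ((0 : Nat) : Int) none ≠ -1 := by
      simpa using hne
    obtain ⟨_, hpre, hmin⟩ := PySem.Chars.findFrom_natCast_spec l ['\n', '#'] 0 (by omega) hz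
    have hfz : PySem.Chars.findFrom l ['\n', '#'] ((0 : Nat) : Int) none
        = PySem.Chars.find l ['\n', '#'] := by simp
    rw [hfz] at hpre hmin
    have hnonneg : 0 ≤ PySem.Chars.find l ['\n', '#'] :=
      (PySem.Chars.find_nonneg_iff l ['\n', '#']).mpr hinf
    set m := (PySem.Chars.find l ['\n', '#']).toNat with hm
    have hqm : q = m := by
      rcases lt_trichotomy q m with h | h | h
      · exact absurd h1 (hmin q (by omega) h)
      · exact h
      · exact absurd hpre (h2 m h)
    simp only
    omega

-- count.go with pattern "\n" counts newlines
theorem countNL_go (l : List Char) : ∀ (fuel acc : Nat), l.length ≤ fuel →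
    PySem.Chars.count.go ['\n'] fuel l acc = acc + l.count '\n' := by
  induction l with
  | nil =>
    intro fuel acc h
    cases fuel <;> simp [PySem.Chars.count.go]
  | cons c rest ih =>
    intro fuel acc h
    match fuel, h with
    | fuel + 1, h =>
      rw [PySem.Chars.count.go]
      by_cases hc : c = '\n'
      · subst hc
        rw [if_pos (by simp [List.isPrefixOf])]
        rw [show List.drop (['\n'] : List Char).length ('\n' :: rest) = rest from rfl,
          ih fuel (acc + 1) (by simp at h; omega)]
        simp
        omega
      · rw [if_neg (by simp [List.isPrefixOf]; exact fun h' => (hc h'.symm).elim)]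
        rw [ih fuel acc (by simp at h; omega)]
        simp [hc]

theorem countNL (l : List Char) : PySem.Chars.count l ['\n'] = l.count '\n' := by
  rw [PySem.Chars.count]
  simp only [List.isEmpty_cons, Bool.false_eq_true, if_false]
  simpa using countNL_go l l.length 0 le_rfl

theorem firstNH_of_no_newline (l : List Char) (h : '\n' ∉ l) : firstNH l = none := by
  induction l with
  | nil => rfl
  | cons c rest ih =>
    rw [firstNH]
    have hc : c ≠ '\n' := fun hc => h (by simp [hc])
    rw [if_neg (by simp [List.isPrefixOf]; exact fun h' => (hc h'.symm).elim)]
    rw [ih (fun hm => h (by simp [hm]))]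
    rfl

theorem firstNH_append_hash (t r : List Char) (h : '\n' ∉ t) :
    firstNH (t ++ '\n' :: '#' :: r) = some t.length := by
  induction t with
  | nil => simp [firstNH, List.isPrefixOf]
  | cons c t' ih =>
    have hc : c ≠ '\n' := fun hc => h (by simp [hc])
    rw [List.cons_append, firstNH]
    rw [if_neg (by simp [List.isPrefixOf]; exact fun h' => (hc h'.symm).elim)]
    rw [ih (fun hm => h (by simp [hm]))]
    simp

theorem firstNH_append_no_hash (t rest : List Char) (h : '\n' ∉ t)
    (hsw : PySem.Chars.startswith rest ['#'] = false) :
    firstNH (t ++ '\n' :: rest) = (firstNH rest).map (fun q => t.length + 1 + q) := by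
  induction t with
  | nil =>
    have hsw' : List.isPrefixOf ['#'] rest = false := by
      simpa [PySem.Chars.startswith] using hsw
    rw [List.nil_append, firstNH]
    rw [if_neg (by simp [List.isPrefixOf, hsw'])]
    cases firstNH rest <;> simp [Nat.add_comm]
  | cons c t' ih =>
    have hc : c ≠ '\n' := fun hc => h (by simp [hc])
    rw [List.cons_append, firstNH]
    rw [if_neg (by simp [List.isPrefixOf]; exact fun h' => (hc h'.symm).elim)]
    rw [ih (fun hm => h (by simp [hm]))]
    cases firstNH rest with
    | none => simp
    | some v => simp; omega

theorem firstNH_newline_mem_take (l : List Char) (q : Nat) (h : firstNH l = some q) :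
    '\n' ∈ l.take (q + 1) := by
  obtain ⟨h1, _⟩ := firstNH_spec l q h
  obtain ⟨u, hu⟩ := h1
  have hql : q + 1 ≤ l.length := by
    have := congrArg List.length hu
    simp [List.length_drop] at this
    omega
  have : l.take (q + 1) = l.take q ++ List.take 1 (l.drop q) := by
    rw [← List.take_add]
  rw [this, ← hu]
  simp

-- B's search, generalized over an offset and a remaining line budget.
def Bgen (cs : List Char) (start : Nat) : Nat → List Char
  | 0 => cs
  | f + 1 =>
    if PySem.Chars.startswith (cs.drop start) ['#'] then cs.drop start
    else
      match firstNH (cs.drop start) with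
      | none => cs
      | some q =>
        if ((cs.drop start).take (q + 1)).count '\n' ≤ f then cs.drop (start + q + 1) else cs

theorem Bgen_hash (cs : List Char) (start f : Nat)
    (h : PySem.Chars.startswith (cs.drop start) ['#'] = true) :
    Bgen cs start (f + 1) = cs.drop start := by
  rw [Bgen, if_pos h]

theorem Bgen_none (cs : List Char) (start f : Nat)
    (hsw : ¬ PySem.Chars.startswith (cs.drop start) ['#'] = true)
    (h : firstNH (cs.drop start) = none) :
    Bgen cs start (f + 1) = cs := by
  rw [Bgen, if_neg hsw, h]

theorem Bgen_some (cs : List Char) (start f q : Nat)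
    (hsw : ¬ PySem.Chars.startswith (cs.drop start) ['#'] = true)
    (h : firstNH (cs.drop start) = some q) :
    Bgen cs start (f + 1) =
      if ((cs.drop start).take (q + 1)).count '\n' ≤ f then cs.drop (start + q + 1) else cs := by
  rw [Bgen, if_neg hsw, h]

theorem stripB_eq_Bgen (cs : List Char) : ∀ (f start : Nat), start ≤ cs.length →
    stripB_go cs f start = Bgen cs start f := by
  intro f
  induction f with
  | zero => intro start _; rw [stripB_go, Bgen]
  | succ f ih =>
    intro start hs
    rw [stripB_go, Bgen]
    by_cases hsw : PySem.Chars.startswith (cs.drop start) ['#'] = true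
    · rw [if_pos hsw, if_pos hsw, PySem.List.slice_from_natCast]
    · rw [if_neg hsw, if_neg hsw]
      have hff := PySem.Chars.findFrom_natCast cs ['\n'] start hs
      by_cases hm : '\n' ∈ cs.drop start
      · -- a newline exists after start: decompose drop start = t ++ '\n' :: rest
        set t := (cs.drop start).takeWhile (· ≠ '\n') with ht
        have hfind : PySem.Chars.find (cs.drop start) ['\n'] = ((t.length : Nat) : Int) := by
          rw [find_newline, if_pos hm, ht]
        rw [hfind] at hff
        have hnl : PySem.Chars.findFrom cs ['\n'] (start : Int) none = ((start + t.length : Nat) : Int) := by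
          rw [hff, if_neg (by omega)]; push_cast; ring
        rw [hnl, if_neg (by push_cast; omega)]
        have hdw : ∃ rest, (cs.drop start).dropWhile (· ≠ '\n') = '\n' :: rest := by
          cases hdwe : (cs.drop start).dropWhile (· ≠ '\n') with
          | nil =>
            exfalso
            rw [List.dropWhile_eq_nil_iff] at hdwe
            have := hdwe '\n' hm
            simp at this
          | cons a r =>
            have hne' : (cs.drop start).dropWhile (· ≠ '\n') ≠ [] := by rw [hdwe]; simp
            have hhead := List.head_dropWhile_not (p := fun x => decide (x ≠ '\n')) hne'
            have ha : ((cs.drop start).dropWhile (· ≠ '\n')).head? = some a := by rw [hdwe]; rfl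
            rw [List.head?_eq_some_head hne'] at ha
            rw [Option.some.inj ha] at hhead
            simp at hhead
            exact ⟨r, by rw [hhead]⟩
        obtain ⟨rest, hrest⟩ := hdw
        have hdecomp : cs.drop start = t ++ '\n' :: rest := by
          rw [ht, ← hrest]; exact (List.takeWhile_append_dropWhile).symm
        have hnot : '\n' ∉ t := by
          intro hmem
          have := List.mem_takeWhile_imp (ht ▸ hmem)
          simp at this
        have hlen : start + t.length + 1 + rest.length = cs.length := by
          have := congrArg List.length hdecomp
          simp [List.length_drop] at this
          omega
        have hstart' : start + t.length + 1 ≤ cs.length := by omega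
        have hcsdrop : cs.drop (start + t.length + 1) = rest := by
          have : cs.drop (start + t.length + 1) = (cs.drop start).drop (t.length + 1) := by
            rw [List.drop_drop]; ring_nf
          rw [this, hdecomp]
          simp
        have htn : (((start + t.length : Nat) : Int)).toNat + 1 = start + t.length + 1 := by omega
        rw [htn, ih (start + t.length + 1) hstart']
        cases f with
        | zero =>
          -- budget exhausted on both sides: everything returns cs
          rw [Bgen, hdecomp]
          cases hnh : firstNH (t ++ '\n' :: rest) with
          | none => rfl
          | some q =>
            have hmem := firstNH_newline_mem_take _ q hnh
            have hcnt : 0 < ((t ++ '\n' :: rest).take (q + 1)).count '\n' :=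
              List.count_pos_iff.mpr hmem
            simp only
            rw [if_neg (by omega)]
        | succ f' =>
          rw [Bgen, hcsdrop]
          by_cases hswr : PySem.Chars.startswith rest ['#'] = true
          · -- rest = '#' :: r: the "\n#" hit is at t.length, one newline before it
            obtain ⟨r, rfl⟩ : ∃ r, rest = '#' :: r := by
              cases rest with
              | nil => simp [PySem.Chars.startswith, List.isPrefixOf] at hswr
              | cons a r =>
                simp [PySem.Chars.startswith, List.isPrefixOf] at hswr
                exact ⟨r, by rw [hswr]⟩
            rw [if_pos hswr, hdecomp, firstNH_append_hash t r hnot]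
            simp only
            have htake : (t ++ '\n' :: '#' :: r).take (t.length + 1) = t ++ ['\n'] := by
              simp [List.take_append]
            rw [htake, if_pos (by simp [List.count_eq_zero_of_not_mem hnot])]
            exact hcsdrop.symm
          · have hswf : PySem.Chars.startswith rest ['#'] = false := by simpa using hswr
            rw [if_neg hswr, hdecomp, firstNH_append_no_hash t rest hnot hswf]
            cases hnh : firstNH rest with
            | none => rfl
            | some q' =>
              simp only [Option.map_some]
              have htake : (t ++ '\n' :: rest).take (t.length + 1 + q' + 1)
                  = t ++ '\n' :: rest.take (q' + 1) := by
                rw [List.take_append, List.take_of_length_le (by omega)]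
                simp [show t.length + 1 + q' + 1 - t.length = q' + 2 by omega]
              rw [htake]
              have hcnt : (t ++ '\n' :: rest.take (q' + 1)).count '\n'
                  = (rest.take (q' + 1)).count '\n' + 1 := by
                simp [List.count_eq_zero_of_not_mem hnot]
              rw [hcnt]
              by_cases hle : (rest.take (q' + 1)).count '\n' ≤ f'
              · rw [if_pos hle,
                  if_pos (show (rest.take (q' + 1)).count '\n' + 1 ≤ f' + 1 by omega)]
                congr 1
                omega
              · rw [if_neg hle,
                  if_neg (show ¬ ((rest.take (q' + 1)).count '\n' + 1 ≤ f' + 1) by omega)]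
      · -- no newline after start: both return cs
        have hfind : PySem.Chars.find (cs.drop start) ['\n'] = -1 := by
          rw [find_newline, if_neg hm]
        rw [hfind] at hff
        norm_num at hff
        rw [hff, if_pos rfl, firstNH_of_no_newline _ hm]

theorem alt_eq_Bgen (text : String) :
    strip_ai_preamble_py_alt text = String.ofList (Bgen text.toList 0 11) := by
  unfold strip_ai_preamble_py_alt
  by_cases hsw : PySem.Chars.startswith text.toList ['#'] = true
  · rw [if_pos hsw, show (11 : Nat) = 10 + 1 from rfl,
      Bgen_hash text.toList 0 10 (by simpa using hsw)]
    simp [String.ofList_toList]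
  · rw [if_neg hsw]
    cases hnh : firstNH text.toList with
    | none =>
      have hfind : PySem.Chars.find text.toList ['\n', '#'] = -1 := by
        rw [find_eq_firstNH, hnh]
      rw [hfind, if_pos rfl, show (11 : Nat) = 10 + 1 from rfl,
        Bgen_none text.toList 0 10 (by simpa using hsw) (by simpa using hnh),
        String.ofList_toList]
    | some q =>
      have hfind : PySem.Chars.find text.toList ['\n', '#'] = (q : Int) := by
        rw [find_eq_firstNH, hnh]
      have hq1 : ((q : Int) + 1) = ((q + 1 : Nat) : Int) := by push_cast; ring
      rw [hfind, if_neg (show ¬ ((q : Int) = -1) by omega), hq1,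
        PySem.List.slice_to_natCast, PySem.List.slice_from_natCast, countNL,
        show (11 : Nat) = 10 + 1 from rfl,
        Bgen_some text.toList 0 10 q (by simpa using hsw) (by simpa using hnh)]
      simp only [List.drop_zero, Nat.zero_add]
      by_cases hle : (text.toList.take (q + 1)).count '\n' ≤ 10
      · rw [if_pos hle, if_pos hle]
      · rw [if_neg hle, if_neg hle, String.ofList_toList]

-- ===== VERDICT (by name: the statement is the Claim_ definition above) =====
theorem strip_ai_preamble_py_spec : Claim_equal_strip_ai_preamble_py := by
  intro text _
  unfold Spec_strip_ai_preamble_py strip_ai_preamble_py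
  simp only [splitOn_eq_mySplit]
  have h := main_loop text.toList 11 0 0 rfl (Nat.zero_le _) (by simp)
  rw [alt_eq_Bgen, ← stripB_eq_Bgen text.toList 11 0 (Nat.zero_le _)]
  simpa using congrArg String.ofList h
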